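-- pv_equiv track=rewrite | github.com/nucamisoo/ide | csvprepro/csv_preprocessor.py | preprocessor
-- ===== SOURCE A (Python) =====
-- def preprocessor(raw_lines, num, raw_line, idx, item):
--     if item.count('"') % 2:
--         if idx == len(raw_line)-1:
--             item_newlined = raw_lines[num+1].pop(0)
--             if item_newlined.endswith('"') and len(raw_lines):
--                 return preprocessor(raw_lines, num+1, raw_line, idx, item)
--             else:
--                 return f'{item}\n{item_newlined}'
--         else:
--             item_separated = raw_line.pop(idx+1)
--             if item_separated.endswith('"'):
--                 return preprocessor(raw_lines, num, raw_line, idx, item)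
--             else:
--                 return f'{item},{item_separated}'
--     return item
-- ===== SOURCE B (Python) =====
-- def preprocessor(raw_lines, num, raw_line, idx, item):
--     # Non-recursive, non-mutating reformulation: slice out the candidate
--     # continuations once and scan them for the first field that closes the
--     # quoted item. Return value only; the input lists are left untouched.
--     if item.count('"') % 2 == 0:
--         return item
--     if idx != len(raw_line) - 1:
--         # the item was split by commas: scan the rest of its own line
--         for t in raw_line[idx+1:]:
--             if not t.endswith('"'):
--                 return f'{item},{t}'
--     # the item was split by a newline: scan the following raw lines
--     for row in raw_lines[num+1:]:
--         first = row[0]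
--         if not first.endswith('"'):
--             return f'{item}\n{first}'
--     raise IndexError('unterminated quoted field')
-- ===== Notes on version B (the rewrite author's own statement) =====
-- stated objective: simpler
-- what changed: Replaced A's tail recursion that repeatedly mutates (pops from) the shared lists with a non-mutating slice-and-scan: take the candidate continuations out of raw_line / raw_lines with one slice each and linearly scan for the first field not ending in a quote; Pre_ restricts to the function's natural domain (non-negative field index idx and line cursor num+1), since negative values only reach A through Python's index wrap-around, which is no part of the CSV-merging task.
-- outside the precondition, e.g. on preprocessor([['x']], -1, ['b', 'c"'], -2, '"'): A returns '",b', B returns '"\nx'; on preprocessor([['x'], ['a"', 'b']], -2, ['q'], 0, '"'): A returns '"\nx', B raises IndexError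
import Mathlib
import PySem

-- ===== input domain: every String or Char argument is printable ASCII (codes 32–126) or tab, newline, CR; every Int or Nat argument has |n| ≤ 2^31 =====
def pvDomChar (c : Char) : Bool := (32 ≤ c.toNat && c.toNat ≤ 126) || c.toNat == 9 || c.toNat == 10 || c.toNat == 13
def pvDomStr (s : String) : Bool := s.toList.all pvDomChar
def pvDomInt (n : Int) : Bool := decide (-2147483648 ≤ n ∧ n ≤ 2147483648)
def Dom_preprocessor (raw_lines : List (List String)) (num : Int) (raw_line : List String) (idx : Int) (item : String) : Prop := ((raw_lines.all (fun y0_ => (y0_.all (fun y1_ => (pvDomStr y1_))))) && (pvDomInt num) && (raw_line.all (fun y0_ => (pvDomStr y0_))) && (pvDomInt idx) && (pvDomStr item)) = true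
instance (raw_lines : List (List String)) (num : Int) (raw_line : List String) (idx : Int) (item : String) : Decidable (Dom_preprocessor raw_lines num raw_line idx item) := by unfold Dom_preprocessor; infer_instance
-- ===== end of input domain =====

-- B replaces A's tail recursion that pops from the shared lists in place with a
-- non-mutating slice-and-scan (objective: simpler); the equivalence is about the
-- RETURN value only — A mutates raw_lines/raw_line in place, B does not.

-- does the field end with a double quote? (shared helper)
def pvEndsQ (t : String) : Bool := PySem.Str.endswith t "\""

-- termination helper for port A's newline branch: replacing a successfully
-- indexed row (x :: rest) by rest strictly shrinks the total number of fields
theorem pvSum_pySetD_lt {rls : List (List String)} {i : Int} {x : String} {rest : List String}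
    (h : PySem.List.pyGet? rls i = some (x :: rest)) :
    ((PySem.List.pySetD rls i rest).map List.length).sum < ((rls.map List.length).sum) := by
  unfold PySem.List.pyGet? at h
  unfold PySem.List.pySetD PySem.List.pySet?
  rcases hk : PySem.List.pyIdx? rls.length i with _ | k
  · rw [hk] at h; simp at h
  · rw [hk] at h
    simp only [Option.bind_some, Option.map_some, Option.getD_some] at h ⊢
    have hklt : k < rls.length := by
      by_contra hge
      rw [List.getElem?_eq_none (by omega)] at h
      simp at h
    have hget : rls[k] = x :: rest := by
      have h2 : rls[k]? = some rls[k] := List.getElem?_eq_getElem hklt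
      rw [h2] at h; exact Option.some.inj h
    have hset : rls.set k rest = rls.take k ++ rest :: rls.drop (k + 1) := by
      rw [List.set_eq_take_append_cons_drop]; exact if_pos hklt
    have hdropk : rls.drop k = rls[k] :: rls.drop (k + 1) := List.drop_eq_getElem_cons hklt
    rw [hset]
    conv_rhs => rw [← List.take_append_drop k rls, hdropk, hget]
    simp

-- ===== PORT A =====
-- literal transliteration of the recursive Python A; the `item` results in the
-- `none`/`some []` arms mark Python IndexErrors (pop/index out of range), all
-- excluded by Pre_preprocessor
def preprocessor (raw_lines : List (List String)) (num : Int) (raw_line : List String) (idx : Int) (item : String) : String :=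
  if PySem.Str.count item "\"" % 2 ≠ 0 then
    if idx = (raw_line.length : Int) - 1 then
      match h1 : PySem.List.pyGet? raw_lines (num + 1) with
      | none => item            -- raw_lines[num+1]: IndexError
      | some [] => item         -- .pop(0) from empty list: IndexError
      | some (x :: rest) =>
        if pvEndsQ x && !raw_lines.isEmpty then
          preprocessor (PySem.List.pySetD raw_lines (num + 1) rest) (num + 1) raw_line idx item
        else item ++ "\n" ++ x
    else
      match h2 : PySem.List.pop? raw_line (idx + 1) with
      | none => item            -- raw_line.pop(idx+1): IndexError
      | some (t, rest) =>
        if pvEndsQ t then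
          preprocessor raw_lines num rest idx item
        else item ++ "," ++ t
  else item
termination_by ((raw_lines.map List.length).sum, raw_line.length)
decreasing_by
  · exact Prod.Lex.left _ _ (pvSum_pySetD_lt h1)
  · have h3 : rest.length + 1 = raw_line.length := by
      exact PySem.List.length_of_pop?_eq_some raw_line h2
    exact Prod.Lex.right _ (by omega)

-- ===== PORT B =====
-- the candidate fields scanned inside the line: the slice raw_line[idx+1:]
def pvCands (raw_line : List String) (idx : Int) : List String :=
  PySem.List.slice raw_line (some (idx + 1)) none

-- B's loop over the following raw lines; the `item` results in the `[]` arms mark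
-- where the Python B raises IndexError (both outside Pre_preprocessor)
def pvAltScanRows (item : String) : List (List String) → String
  | [] => item                  -- Python B: raise IndexError
  | row :: rs =>
    match row with
    | [] => item                -- row[0]: IndexError
    | x :: _ => if pvEndsQ x then pvAltScanRows item rs else item ++ "\n" ++ x

def preprocessor_alt (raw_lines : List (List String)) (num : Int) (raw_line : List String) (idx : Int) (item : String) : String :=
  if PySem.Str.count item "\"" % 2 = 0 then item
  else
    let lineFind : Option String :=
      if idx ≠ (raw_line.length : Int) - 1 then
        (pvCands raw_line idx).find? (fun t => !pvEndsQ t)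
      else none
    match lineFind with
    | some t => item ++ "," ++ t
    | none => pvAltScanRows item (PySem.List.slice raw_lines (some (num + 1)) none)

-- ===== PRECONDITION & SPEC =====
def pvRows (raw_lines : List (List String)) (num : Int) : List (List String) :=
  PySem.List.slice raw_lines (some (num + 1)) none
def pvRowOk (r : List String) : Bool := !r.isEmpty && pvEndsQ (r.headD "")
def pvRowHit (r : List String) : Bool := !r.isEmpty && !pvEndsQ (r.headD "")

-- Pre_ restricts to the function's natural domain — a non-negative field index
-- idx and line cursor num+1 (negative values only reach A through Python's
-- index wrap-around, no part of the CSV-merging task) — and within it admits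
-- exactly the inputs on which the Python A returns normally (no IndexError).
def Pre_preprocessor (raw_lines : List (List String)) (num : Int) (raw_line : List String) (idx : Int) (item : String) : Prop :=
  PySem.Str.count item "\"" % 2 = 0
  ∨ (0 ≤ idx ∧ idx ≠ (raw_line.length : Int) - 1 ∧ (pvCands raw_line idx).any (fun t => !pvEndsQ t) = true)
  ∨ (0 ≤ idx ∧ idx ≤ (raw_line.length : Int) - 1 ∧ (pvCands raw_line idx).all pvEndsQ = true
     ∧ 0 ≤ num + 1
     ∧ ∃ j : Nat, j < (pvRows raw_lines num).length
         ∧ (∀ i : Nat, i < j → pvRowOk ((pvRows raw_lines num).getD i []) = true)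
         ∧ pvRowHit ((pvRows raw_lines num).getD j []) = true)

instance (raw_lines : List (List String)) (num : Int) (raw_line : List String) (idx : Int) (item : String) : Decidable (Pre_preprocessor raw_lines num raw_line idx item) := by
  unfold Pre_preprocessor; infer_instance

def pvWitness_preprocessor : List (List String) × Int × List String × Int × String :=
  ([["x"]], -1, ["a"], 0, "\"")

def Spec_preprocessor (raw_lines : List (List String)) (num : Int) (raw_line : List String) (idx : Int) (item : String) (out : String) : Prop := out = preprocessor_alt raw_lines num raw_line idx item
instance (raw_lines : List (List String)) (num : Int) (raw_line : List String) (idx : Int) (item : String) (out : String) : Decidable (Spec_preprocessor raw_lines num raw_line idx item out) := by unfold Spec_preprocessor; infer_instance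

-- ===== CLAIM (what is proved, stated in full; the proofs are below) =====
def Claim_equal_preprocessor : Prop := ∀ (raw_lines : List (List String)) (num : Int) (raw_line : List String) (idx : Int) (item : String), Dom_preprocessor raw_lines num raw_line idx item → Pre_preprocessor raw_lines num raw_line idx item → Spec_preprocessor raw_lines num raw_line idx item (preprocessor raw_lines num raw_line idx item)

-- ===== LEMMAS AND PROOFS =====

theorem pvWitness_ok :
    Dom_preprocessor pvWitness_preprocessor.1 pvWitness_preprocessor.2.1 pvWitness_preprocessor.2.2.1
      pvWitness_preprocessor.2.2.2.1 pvWitness_preprocessor.2.2.2.2 ∧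
    Pre_preprocessor pvWitness_preprocessor.1 pvWitness_preprocessor.2.1 pvWitness_preprocessor.2.2.1
      pvWitness_preprocessor.2.2.2.1 pvWitness_preprocessor.2.2.2.2 := by
  constructor <;> decide

-- erasing the element just after a prefix
theorem pvEraseIdx_append {α : Type} (F : List α) (t : α) (ls : List α) :
    (F ++ t :: ls).eraseIdx F.length = F ++ ls := by
  induction F with
  | nil => simp
  | cons a F ih => simpa using ih

-- indexing just after a prefix
theorem pvGet?_append {α : Type} (F : List α) (t : α) (ls : List α) :
    (F ++ t :: ls)[F.length]? = some t := by
  induction F with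
  | nil => rfl
  | cons a F ih => simpa using ih

-- Python pop at the index just after a prefix
theorem pvPop_append (F : List String) (t : String) (ls : List String) :
    PySem.List.pop? (F ++ t :: ls) (F.length : Int) = some (t, F ++ ls) := by
  have hidx : PySem.List.pyIdx? (F ++ t :: ls).length (F.length : Int) = some F.length := by
    unfold PySem.List.pyIdx?
    rw [if_pos (by positivity), if_pos (by simp)]
    simp
  unfold PySem.List.pop?
  rw [hidx]
  show Option.map (fun x => (x, (F ++ t :: ls).eraseIdx F.length)) ((F ++ t :: ls)[F.length]?)
      = some (t, F ++ ls)
  rw [pvGet?_append, pvEraseIdx_append]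
  rfl

-- A's inner-line loop: popping forward from idx+1 scans the suffix l for the
-- first field that does not end in a quote; if the whole suffix ends in quotes,
-- A continues with the shortened line F
theorem pvCommaLoop (l : List String) (F : List String) (rls : List (List String))
    (num : Int) (idx : Int) (item : String)
    (hq : PySem.Str.count item "\"" % 2 ≠ 0) (hidx : idx + 1 = (F.length : Int)) :
    preprocessor rls num (F ++ l) idx item =
      match l.find? (fun t => !pvEndsQ t) with
      | some t => item ++ "," ++ t
      | none => preprocessor rls num F idx item := by
  induction l with
  | nil => simp
  | cons t ls ih =>
    have hne : idx ≠ ((F ++ t :: ls).length : Int) - 1 := by simp; omega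
    have hpop : PySem.List.pop? (F ++ t :: ls) (idx + 1) = some (t, F ++ ls) := by
      rw [hidx]; exact pvPop_append F t ls
    rw [preprocessor, if_pos hq, if_neg hne]
    split
    · rename_i h; rw [hpop] at h; simp at h
    · rename_i t' rest' h
      rw [hpop] at h
      simp only [Option.some.injEq, Prod.mk.injEq] at h
      obtain ⟨rfl, rfl⟩ := h
      by_cases he : pvEndsQ t
      · rw [if_pos he, List.find?_cons_of_neg (by simp [he])]
        exact ih
      · rw [if_neg he, List.find?_cons_of_pos (by simp [he])]

-- the answer of the row scan (proof-side characterisation of both row loops)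
def pvRowsAns : List (List String) → Option String
  | [] => none
  | r :: rs =>
    match r with
    | [] => none
    | x :: _ => if pvEndsQ x then pvRowsAns rs else some x

theorem pvAltScanRows_eq (item : String) (l : List (List String)) (x : String)
    (h : pvRowsAns l = some x) : pvAltScanRows item l = item ++ "\n" ++ x := by
  induction l with
  | nil => simp [pvRowsAns] at h
  | cons r rs ih =>
    match r with
    | [] => simp [pvRowsAns] at h
    | y :: ys =>
      by_cases he : pvEndsQ y
      · simp only [pvRowsAns, he, if_pos] at h
        simp only [pvAltScanRows, he, if_pos]
        exact ih h
      · simp only [pvRowsAns, he, if_neg, Bool.false_eq_true, not_false_eq_true,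
          Option.some.injEq] at h
        subst h
        simp [pvAltScanRows, he]

theorem pvHit_rowsAns (l : List (List String))
    (h : ∃ j : Nat, j < l.length ∧ (∀ i : Nat, i < j → pvRowOk (l.getD i []) = true)
        ∧ pvRowHit (l.getD j []) = true) :
    ∃ x, pvRowsAns l = some x := by
  induction l with
  | nil => obtain ⟨j, hj, _, _⟩ := h; simp at hj
  | cons r rs ih =>
    obtain ⟨j, hj, hok, hhit⟩ := h
    match j with
    | 0 =>
      simp only [List.getD_cons_zero] at hhit
      unfold pvRowHit at hhit
      match r with
      | [] => simp at hhit
      | x :: _ =>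
        simp only [List.headD_cons, Bool.and_eq_true, Bool.not_eq_true'] at hhit
        exact ⟨x, by simp [pvRowsAns, hhit.2]⟩
    | j' + 1 =>
      have hok0 := hok 0 (by omega)
      simp only [List.getD_cons_zero] at hok0
      unfold pvRowOk at hok0
      match r with
      | [] => simp at hok0
      | x :: _ =>
        simp only [List.headD_cons, Bool.and_eq_true] at hok0
        obtain ⟨ans, hans⟩ := ih ⟨j', by simpa using hj,
          fun i hi => by simpa using hok (i + 1) (by omega), by simpa using hhit⟩
        exact ⟨ans, by simp [pvRowsAns, hok0.2, hans]⟩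

-- dropping past a set position ignores the set
theorem pvDropSet {α : Type} : ∀ (l : List α) (j : Nat) (v : α),
    (l.set j v).drop (j + 1) = l.drop (j + 1)
  | [], _, _ => rfl
  | _ :: _, 0, _ => rfl
  | a :: l, j + 1, v => by simpa using pvDropSet l j v

-- A's newline loop: starting at position j = num+1 ≥ 0 of raw_lines, the loop
-- reads first elements of successive rows; pvRowsAns on the suffix is its result
theorem pvPhase1 (l : List (List String)) :
    ∀ (rls : List (List String)) (j : Nat) (num : Int) (raw_line : List String)
      (idx : Int) (item : String) (x : String),
      PySem.Str.count item "\"" % 2 ≠ 0 →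
      idx = (raw_line.length : Int) - 1 →
      rls.drop j = l →
      num + 1 = (j : Int) →
      pvRowsAns l = some x →
      preprocessor rls num raw_line idx item = item ++ "\n" ++ x := by
  induction l with
  | nil => intro _ _ _ _ _ _ _ _ _ _ _ hans; simp [pvRowsAns] at hans
  | cons r rs ih =>
    intro rls j num raw_line idx item x hq hidx hdrop hrel hans
    have hjlt : j < rls.length := by
      by_contra hge
      rw [List.drop_eq_nil_of_le (by omega)] at hdrop
      simp at hdrop
    have hgetr : rls[j] = r := by
      have h := List.drop_eq_getElem_cons hjlt
      rw [hdrop] at h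
      exact ((List.cons.inj h).1).symm
    have hdropsucc : rls.drop (j + 1) = rs := by
      have h := List.drop_eq_getElem_cons hjlt
      rw [hdrop] at h
      exact ((List.cons.inj h).2).symm
    have hidxq : PySem.List.pyIdx? rls.length (num + 1) = some j := by
      unfold PySem.List.pyIdx?
      rw [if_pos (by omega), if_pos (by omega)]
      congr 1; omega
    have hget : PySem.List.pyGet? rls (num + 1) = some r := by
      unfold PySem.List.pyGet?
      rw [hidxq]
      simp [List.getElem?_eq_getElem hjlt, hgetr]
    have hempty : rls.isEmpty = false := by
      cases rls with
      | nil => simp at hjlt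
      | cons _ _ => rfl
    rw [preprocessor, if_pos hq, if_pos hidx]
    split
    · rename_i h; rw [hget] at h; simp at h
    · rename_i h; rw [hget] at h
      injection h with h
      rw [h] at hans
      simp [pvRowsAns] at hans
    · rename_i x0 rest h
      rw [hget] at h
      injection h with h
      subst h
      rw [hempty]
      simp only [Bool.not_false, Bool.and_true]
      by_cases he : pvEndsQ x0
      · rw [if_pos he]
        simp only [pvRowsAns, he, if_pos] at hans
        have hset : PySem.List.pySetD rls (num + 1) rest = rls.set j rest := by
          unfold PySem.List.pySetD PySem.List.pySet?
          rw [hidxq]; rfl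
        rw [hset]
        refine ih (rls.set j rest) (j + 1) (num + 1) raw_line idx item x hq hidx ?_ (by push_cast; omega) hans
        rw [pvDropSet]
        exact hdropsucc
      · rw [if_neg he]
        simp only [pvRowsAns, he, if_neg, Bool.false_eq_true, not_false_eq_true,
          Option.some.injEq] at hans
        rw [hans]

-- reduce port B past its quote-parity test
theorem pvAlt_red (rls : List (List String)) (num : Int) (raw_line : List String)
    (idx : Int) (item : String) (hq : PySem.Str.count item "\"" % 2 ≠ 0) :
    preprocessor_alt rls num raw_line idx item =
      match (if idx ≠ (raw_line.length : Int) - 1 then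
              (pvCands raw_line idx).find? (fun t => !pvEndsQ t) else none) with
      | some t => item ++ "," ++ t
      | none => pvAltScanRows item (PySem.List.slice rls (some (num + 1)) none) := by
  rw [preprocessor_alt, if_neg hq]

-- ===== VERDICT (by name: the statement is the Claim_ definition above) =====
theorem preprocessor_spec : Claim_equal_preprocessor := by
  intro rls num raw_line idx item _ hPre
  unfold Spec_preprocessor
  by_cases hq : PySem.Str.count item "\"" % 2 = 0
  · rw [preprocessor, if_neg (not_not_intro hq), preprocessor_alt, if_pos hq]
  · rw [pvAlt_red rls num raw_line idx item hq]
    rcases hPre with hP | ⟨hi, hne, hany⟩ | ⟨hi, hle, hall, hnum, hhit⟩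
    · exact absurd hP hq
    · -- a field not ending in a quote is found inside the line
      obtain ⟨t, hfind⟩ : ∃ t, (pvCands raw_line idx).find? (fun t => !pvEndsQ t) = some t := by
        cases hf : (pvCands raw_line idx).find? (fun t => !pvEndsQ t) with
        | some t => exact ⟨t, rfl⟩
        | none =>
          obtain ⟨u, hu, hpu⟩ := List.any_eq_true.mp hany
          exact absurd hpu (by simpa using List.find?_eq_none.mp hf u hu)
      rw [if_pos hne, hfind]
      have hc : pvCands raw_line idx = raw_line.drop (idx + 1).toNat := by
        unfold pvCands
        rw [PySem.List.slice_from _ (by omega)]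
      rw [hc] at hfind
      have hdlt : (idx + 1).toNat ≤ raw_line.length := by
        by_contra hgt
        rw [List.drop_eq_nil_of_le (by omega)] at hfind
        simp at hfind
      have hFlen : idx + 1 = ((raw_line.take (idx + 1).toNat).length : Int) := by
        simp [List.length_take]; omega
      have hred := pvCommaLoop (raw_line.drop (idx + 1).toNat) (raw_line.take (idx + 1).toNat)
        rls num idx item hq hFlen
      rw [hfind] at hred
      have hsplit : raw_line = raw_line.take (idx + 1).toNat ++ raw_line.drop (idx + 1).toNat :=
        (List.take_append_drop _ _).symm
      conv_lhs => rw [hsplit]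
      exact hred
    · -- the line is exhausted: the continuation is on the following raw lines
      have hfnone : (pvCands raw_line idx).find? (fun t => !pvEndsQ t) = none := by
        rw [List.find?_eq_none]
        intro t ht
        have := List.all_eq_true.mp hall t ht
        simp [this]
      have hBnone : (if idx ≠ (raw_line.length : Int) - 1 then
          (pvCands raw_line idx).find? (fun t => !pvEndsQ t) else none) = none := by
        split <;> simp [hfnone]
      rw [hBnone]
      obtain ⟨ansx, hans⟩ := pvHit_rowsAns _ hhit
      have hj : pvRows rls num = rls.drop (num + 1).toNat := by
        unfold pvRows
        rw [PySem.List.slice_from _ hnum]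
      rw [hj] at hans
      have hB : pvAltScanRows item (PySem.List.slice rls (some (num + 1)) none)
          = item ++ "\n" ++ ansx := by
        have : PySem.List.slice rls (some (num + 1)) none = rls.drop (num + 1).toNat := hj
        rw [this]
        exact pvAltScanRows_eq item _ ansx hans
      rw [hB]
      by_cases hcase : idx = (raw_line.length : Int) - 1
      · exact pvPhase1 (rls.drop (num + 1).toNat) rls (num + 1).toNat num raw_line idx item ansx
          hq hcase rfl (by omega) hans
      · -- 0 ≤ idx < len-1 and every candidate ends in a quote: A first shortens
        -- the line to its first idx+1 fields, then scans the rows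
        have hc : pvCands raw_line idx = raw_line.drop (idx + 1).toNat := by
          unfold pvCands
          rw [PySem.List.slice_from _ (by omega)]
        rw [hc] at hfnone
        have hFlen : idx + 1 = ((raw_line.take (idx + 1).toNat).length : Int) := by
          simp [List.length_take]; omega
        have hred := pvCommaLoop (raw_line.drop (idx + 1).toNat) (raw_line.take (idx + 1).toNat)
          rls num idx item hq hFlen
        rw [hfnone] at hred
        have hsplit : raw_line = raw_line.take (idx + 1).toNat ++ raw_line.drop (idx + 1).toNat :=
          (List.take_append_drop _ _).symm
        conv_lhs => rw [hsplit]
        exact hred.trans (pvPhase1 (rls.drop (num + 1).toNat) rls (num + 1).toNat num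
          (raw_line.take (idx + 1).toNat) idx item ansx hq (by omega) rfl (by omega) hans)
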